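-- pv_equiv track=rewrite | github.com/WaleedaRaza/StockScouter | scrapers/swarms/technical_analysis_swarm.py | clean_and_merge_volume_data
-- ===== SOURCE A (Python) =====
-- from typing import Dict, List, Any, Optional
--
-- def clean_and_merge_volume_data(volume_data: List[Dict]) -> List[Dict]:
--     """Clean and merge volume data from multiple sources"""
--     if not volume_data:
--         return []
--
--     # Remove duplicates and sort by timestamp
--     unique_data = {}
--     for data in volume_data:
--         timestamp = data.get('timestamp', '')
--         if timestamp and timestamp not in unique_data:
--             unique_data[timestamp] = data
--
--     return sorted(unique_data.values(), key=lambda x: x.get('timestamp', ''))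
-- ===== SOURCE B (Python) =====
-- def clean_and_merge_volume_data(volume_data):
--     """Clean and merge volume data: sort by timestamp, then keep the first record per timestamp."""
--     filtered = [d for d in volume_data if d.get('timestamp', '')]
--     out = []
--     seen = set()
--     for d in sorted(filtered, key=lambda x: x.get('timestamp', '')):
--         ts = d.get('timestamp', '')
--         if ts not in seen:
--             seen.add(ts)
--             out.append(d)
--     return out
-- ===== Notes on version B (the rewrite author's own statement) =====
-- stated objective: alternative
-- what changed: A dedupes into a dict keyed by timestamp and then sorts its values; B filters out falsy timestamps, sorts first, and dedupes in a single pass over the sorted list with a seen-set (stability of the sort keeps the same first-occurrence record).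
import Mathlib
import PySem

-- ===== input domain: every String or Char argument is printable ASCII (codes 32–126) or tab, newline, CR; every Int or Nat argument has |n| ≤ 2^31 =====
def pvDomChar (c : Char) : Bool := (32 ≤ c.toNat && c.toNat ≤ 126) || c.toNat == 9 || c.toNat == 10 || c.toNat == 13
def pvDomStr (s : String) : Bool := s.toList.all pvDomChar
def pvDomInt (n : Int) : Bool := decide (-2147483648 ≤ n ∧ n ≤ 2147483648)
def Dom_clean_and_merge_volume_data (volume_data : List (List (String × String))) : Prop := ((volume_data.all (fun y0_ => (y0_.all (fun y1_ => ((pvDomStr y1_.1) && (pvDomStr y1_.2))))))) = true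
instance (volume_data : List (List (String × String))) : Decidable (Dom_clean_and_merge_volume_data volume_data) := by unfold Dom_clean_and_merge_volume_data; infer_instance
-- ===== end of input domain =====

-- B dedupes in one pass over the SORTED list with a seen-set instead of A's dict-then-sort; same cost, different decomposition.

-- shared helper: data.get('timestamp', '')  (first match in the record's association list)
def pvTs (r : List (String × String)) : String := (PySem.Dict.mk r).getD "timestamp" ""

-- ===== PORT A =====
def clean_and_merge_volume_data (volume_data : List (List (String × String))) : List (List (String × String)) :=
  if volume_data = [] then []
  else
    let unique_data := volume_data.foldl
      (fun (d : PySem.Dict String (List (String × String))) data =>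
        let timestamp := pvTs data
        if timestamp ≠ "" ∧ ¬ (d.contains timestamp = true) then d.insert timestamp data else d)
      (PySem.Dict.mk [])
    PySem.List.sorted unique_data.values (fun x => pvTs x)

-- ===== PORT B =====
def clean_and_merge_volume_data_alt (volume_data : List (List (String × String))) : List (List (String × String)) :=
  let filtered := volume_data.filter (fun d => pvTs d ≠ "")
  (List.foldl
    (fun (acc : List (List (String × String)) × PySem.Set String) d =>
      let ts := pvTs d
      if acc.2.contains ts = true then acc else (acc.1 ++ [d], acc.2.add ts))
    ([], PySem.Set.ofList [])
    (PySem.List.sorted filtered (fun x => pvTs x))).1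

-- ===== PRECONDITION & SPEC =====
def Spec_clean_and_merge_volume_data (volume_data : List (List (String × String))) (out : List (List (String × String))) : Prop := out = clean_and_merge_volume_data_alt volume_data
instance (volume_data : List (List (String × String))) (out : List (List (String × String))) : Decidable (Spec_clean_and_merge_volume_data volume_data out) := by unfold Spec_clean_and_merge_volume_data; infer_instance

-- ===== CLAIM (what is proved, stated in full; the proofs are below) =====
def Claim_equal_clean_and_merge_volume_data : Prop := ∀ (volume_data : List (List (String × String))), Dom_clean_and_merge_volume_data volume_data → Spec_clean_and_merge_volume_data volume_data (clean_and_merge_volume_data volume_data)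

-- ===== LEMMAS AND PROOFS =====

-- first-occurrence dedup by timestamp key, given a set (list) of already-seen keys
def pvFbk (seen : List String) : List (List (String × String)) → List (List (String × String))
  | [] => []
  | r :: rs => if pvTs r ∈ seen then pvFbk seen rs else r :: pvFbk (pvTs r :: seen) rs

theorem pvFbk_congr (zs : List (List (String × String))) : ∀ (s1 s2 : List String),
    (∀ r ∈ zs, (pvTs r ∈ s1 ↔ pvTs r ∈ s2)) → pvFbk s1 zs = pvFbk s2 zs := by
  induction zs with
  | nil => intro s1 s2 h; rfl
  | cons r rs ih =>
    intro s1 s2 h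
    by_cases hm : pvTs r ∈ s1
    · have hm2 : pvTs r ∈ s2 := (h r (by simp)).mp hm
      simp [pvFbk, hm, hm2]
      exact ih s1 s2 (fun x hx => h x (by simp [hx]))
    · have hm2 : pvTs r ∉ s2 := fun h2 => hm ((h r (by simp)).mpr h2)
      simp [pvFbk, hm, hm2]
      exact ih _ _ (fun x hx => by
        simp only [List.mem_cons]
        exact or_congr Iff.rfl (h x (by simp [hx])))

theorem pvFbk_not_seen {zs : List (List (String × String))} : ∀ {seen : List String}
    {z : List (String × String)}, z ∈ pvFbk seen zs → pvTs z ∉ seen := by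
  induction zs with
  | nil => intro seen z h; simp [pvFbk] at h
  | cons r rs ih =>
    intro seen z h
    by_cases hm : pvTs r ∈ seen
    · simp [pvFbk, hm] at h; exact ih h
    · simp [pvFbk, hm] at h
      rcases h with h | h
      · subst h; exact hm
      · intro hc; exact ih h (by simp [hc])

theorem pvFbk_sublist (zs : List (List (String × String))) (seen : List String) :
    (pvFbk seen zs).Sublist zs := by
  induction zs generalizing seen with
  | nil => simp [pvFbk]
  | cons r rs ih =>
    by_cases hm : pvTs r ∈ seen
    · simp [pvFbk, hm]; exact (ih seen).cons r
    · simp [pvFbk, hm]; exact ih _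

theorem pvFbk_pairwise_ne (zs : List (List (String × String))) : ∀ (seen : List String),
    (pvFbk seen zs).Pairwise (fun a b => pvTs a ≠ pvTs b) := by
  induction zs with
  | nil => intro seen; simp [pvFbk]
  | cons r rs ih =>
    intro seen
    by_cases hm : pvTs r ∈ seen
    · simp [pvFbk, hm]; exact ih seen
    · simp only [pvFbk, if_neg hm]
      refine List.Pairwise.cons ?_ (ih _)
      intro b hb heq
      exact pvFbk_not_seen hb (by simp [heq])

theorem pvFbk_nodup (zs : List (List (String × String))) (seen : List String) :
    (pvFbk seen zs).Nodup := by
  refine (pvFbk_pairwise_ne zs seen).imp ?_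
  intro a b h hab; exact h (by rw [hab])

theorem pvMem_fbk (zs : List (List (String × String))) : ∀ (seen : List String)
    (z : List (String × String)),
    z ∈ pvFbk seen zs ↔ (pvTs z ∉ seen ∧ (zs.filter (fun w => pvTs w == pvTs z)).head? = some z) := by
  induction zs with
  | nil => intro seen z; simp [pvFbk]
  | cons r rs ih =>
    intro seen z
    by_cases hk : pvTs r = pvTs z
    · have hbeq : (pvTs r == pvTs z) = true := beq_iff_eq.mpr hk
      by_cases hm : pvTs r ∈ seen
      · have hseen : pvTs z ∈ seen := hk ▸ hm
        rw [List.filter_cons_of_pos (by simpa using hbeq)]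
        simp only [pvFbk, if_pos hm]
        constructor
        · intro h; exact absurd hseen (pvFbk_not_seen h)
        · rintro ⟨h1, _⟩; exact absurd hseen h1
      · rw [List.filter_cons_of_pos (by simpa using hbeq)]
        simp only [pvFbk, if_neg hm, List.mem_cons, List.head?_cons, Option.some.injEq]
        constructor
        · rintro (h | h)
          · exact ⟨hk ▸ hm, h.symm⟩
          · exact absurd (show pvTs z ∈ pvTs r :: seen from by
              rw [← hk]; exact List.mem_cons_self) (pvFbk_not_seen h)
        · rintro ⟨_, h⟩; exact Or.inl h.symm
    · have hbeq : ¬ ((pvTs r == pvTs z) = true) := by simpa using hk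
      by_cases hm : pvTs r ∈ seen
      · rw [List.filter_cons_of_neg (by simpa using hbeq)]
        simp only [pvFbk, if_pos hm]
        exact ih seen z
      · rw [List.filter_cons_of_neg (by simpa using hbeq)]
        simp only [pvFbk, if_neg hm, List.mem_cons]
        rw [ih (pvTs r :: seen) z]
        constructor
        · rintro (h | ⟨h1, h2⟩)
          · exact absurd (congrArg pvTs h) (fun hc => hk hc.symm)
          · exact ⟨fun hc => h1 (List.mem_cons_of_mem _ hc), h2⟩
        · rintro ⟨h1, h2⟩
          refine Or.inr ⟨?_, h2⟩
          simp only [List.mem_cons]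
          rintro (hc | hc)
          · exact hk hc.symm
          · exact h1 hc

theorem pvInsertBy_filter (acc : List (List (String × String))) (x : List (String × String))
    (t : String) (h : acc.Pairwise (fun a b => pvTs a ≤ pvTs b)) :
    (PySem.List.insertBy (fun a b => decide (pvTs a < pvTs b)) x acc).filter (fun w => pvTs w == t)
      = if pvTs x == t then acc.filter (fun w => pvTs w == t) ++ [x]
        else acc.filter (fun w => pvTs w == t) := by
  induction acc with
  | nil =>
    simp only [PySem.List.insertBy]
    by_cases hxt : (pvTs x == t) = true <;> simp [hxt]
  | cons a l ih =>
    rw [List.pairwise_cons] at h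
    simp only [PySem.List.insertBy]
    by_cases hlt : pvTs x < pvTs a
    · rw [if_pos (by simpa using hlt)]
      by_cases hxt : (pvTs x == t) = true
      · have hnil : List.filter (fun w => pvTs w == t) (a :: l) = [] := by
          rw [List.filter_eq_nil_iff]
          intro w hw
          have hge : pvTs a ≤ pvTs w := by
            rcases List.mem_cons.mp hw with h1 | h1
            · exact h1 ▸ le_refl _
            · exact h.1 w h1
          have ht : t = pvTs x := (beq_iff_eq.mp hxt).symm
          simp only [beq_iff_eq, ht]
          exact fun hc => absurd (hc ▸ (lt_of_lt_of_le hlt hge)) (lt_irrefl _)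
        rw [List.filter_cons_of_pos (by simpa using hxt), hnil, if_pos hxt]
        simp
      · rw [List.filter_cons_of_neg (by simpa using hxt), if_neg hxt]
    · rw [if_neg (by simpa using hlt)]
      have ihl := ih h.2
      by_cases hat : (pvTs a == t) = true
      · rw [List.filter_cons_of_pos (by simpa using hat),
          List.filter_cons_of_pos (by simpa using hat), ihl]
        by_cases hxt : (pvTs x == t) = true <;> simp [hxt]
      · rw [List.filter_cons_of_neg (by simpa using hat),
          List.filter_cons_of_neg (by simpa using hat), ihl]

theorem pvSorted_filter (zs : List (List (String × String))) (t : String) :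
    (PySem.List.sorted zs (fun x => pvTs x)).filter (fun w => pvTs w == t)
      = zs.filter (fun w => pvTs w == t) := by
  induction zs using List.reverseRecOn with
  | nil => rfl
  | append_singleton ws x ih =>
    rw [PySem.List.sorted_eq_foldl_insertBy, List.foldl_append, List.foldl_cons, List.foldl_nil,
      ← PySem.List.sorted_eq_foldl_insertBy,
      pvInsertBy_filter _ _ _ (PySem.List.sorted_pairwise ws _), List.filter_append]
    by_cases hxt : (pvTs x == t) = true
    · rw [if_pos hxt, ih]
      simp [hxt]
    · rw [if_neg hxt, ih]
      simp [hxt]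

-- sort-then-dedupe equals dedupe-then-sort (stability of the PySem sort)
theorem pvSorted_fbk_comm (ys : List (List (String × String))) (seen : List String) :
    PySem.List.sorted (pvFbk seen ys) (fun x => pvTs x)
      = pvFbk seen (PySem.List.sorted ys (fun x => pvTs x)) := by
  apply PySem.List.sorted_eq_of_perm_of_pairwise_lt
  · rw [List.perm_ext_iff_of_nodup (pvFbk_nodup _ _) (pvFbk_nodup _ _)]
    intro z
    rw [pvMem_fbk, pvMem_fbk, pvSorted_filter]
  · have hsub := pvFbk_sublist (PySem.List.sorted ys (fun x => pvTs x)) seen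
    have hle := List.Pairwise.sublist hsub (PySem.List.sorted_pairwise ys (fun x => pvTs x))
    have hne := pvFbk_pairwise_ne (PySem.List.sorted ys (fun x => pvTs x)) seen
    exact (hle.and hne).imp (fun h => lt_of_le_of_ne h.1 h.2)

theorem pvFoldA (xs : List (List (String × String))) : ∀ (d : PySem.Dict String (List (String × String)))
    (l : List String), (∀ t : String, (t = "" ∨ d.contains t = true) ↔ t ∈ l) →
    (xs.foldl (fun d data =>
        let timestamp := pvTs data
        if timestamp ≠ "" ∧ ¬ (d.contains timestamp = true) then d.insert timestamp data else d) d).values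
      = d.values ++ pvFbk l xs := by
  induction xs with
  | nil => intro d l h; simp [pvFbk]
  | cons r rs ih =>
    intro d l h
    simp only [List.foldl_cons]
    by_cases hc : pvTs r ≠ "" ∧ ¬ (d.contains (pvTs r) = true)
    · have hnotin : pvTs r ∉ l := by
        intro hin
        rcases (h (pvTs r)).mpr hin with h1 | h1
        · exact hc.1 h1
        · exact hc.2 h1
      have hitems : (d.insert (pvTs r) r).items = d.items ++ [(pvTs r, r)] := by
        simp [PySem.Dict.insert, hc.2]
      rw [if_pos hc]
      rw [ih (d.insert (pvTs r) r) (pvTs r :: l) ?_]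
      · simp only [pvFbk, if_neg hnotin, PySem.Dict.values, hitems]
        simp
      · intro t
        have hcont : (d.insert (pvTs r) r).contains t = (d.contains t || (pvTs r == t)) := by
          simp [PySem.Dict.contains, hitems]
        rw [hcont]
        constructor
        · rintro (h1 | h1)
          · exact List.mem_cons_of_mem _ ((h t).mp (Or.inl h1))
          · rcases Bool.or_eq_true_iff.mp h1 with h2 | h2
            · exact List.mem_cons_of_mem _ ((h t).mp (Or.inr h2))
            · exact (beq_iff_eq.mp h2) ▸ List.mem_cons_self
        · intro h1
          rcases List.mem_cons.mp h1 with h2 | h2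
          · exact Or.inr (by simp [h2])
          · rcases (h t).mpr h2 with h3 | h3
            · exact Or.inl h3
            · exact Or.inr (by simp [h3])
    · have hin : pvTs r ∈ l := by
        rcases Decidable.not_and_iff_or_not.mp hc with h1 | h1
        · exact (h (pvTs r)).mp (Or.inl (Decidable.not_not.mp h1))
        · exact (h (pvTs r)).mp (Or.inr (Decidable.not_not.mp h1))
      rw [if_neg hc]
      simp only [pvFbk, if_pos hin]
      exact ih d l h

theorem pvFbk_filter (zs : List (List (String × String))) : ∀ (seen : List String), "" ∈ seen →
    pvFbk seen zs = pvFbk seen (zs.filter (fun r => pvTs r ≠ "")) := by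
  induction zs with
  | nil => intro seen h; rfl
  | cons r rs ih =>
    intro seen hin
    by_cases he : pvTs r = ""
    · have hm : pvTs r ∈ seen := he ▸ hin
      rw [List.filter_cons_of_neg (by simpa using he)]
      simp only [pvFbk, if_pos hm]
      exact ih seen hin
    · rw [List.filter_cons_of_pos (by simpa using he)]
      by_cases hm : pvTs r ∈ seen
      · simp only [pvFbk, if_pos hm]
        exact ih seen hin
      · simp only [pvFbk, if_neg hm]
        rw [ih (pvTs r :: seen) (List.mem_cons_of_mem _ hin)]

theorem pvFoldB (zs : List (List (String × String))) : ∀ (acc : List (List (String × String)))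
    (seen : PySem.Set String),
    (zs.foldl (fun (acc : List (List (String × String)) × PySem.Set String) d =>
        let ts := pvTs d
        if acc.2.contains ts = true then acc else (acc.1 ++ [d], acc.2.add ts)) (acc, seen)).1
      = acc ++ pvFbk seen zs := by
  induction zs with
  | nil => intro acc seen; simp [pvFbk]
  | cons d zs ih =>
    intro acc seen
    simp only [List.foldl_cons]
    by_cases hc : PySem.Set.contains seen (pvTs d) = true
    · have hm : pvTs d ∈ seen := by simpa [PySem.Set.contains] using hc
      rw [if_pos hc]
      simp only [pvFbk, if_pos hm]
      exact ih acc seen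
    · have hm : pvTs d ∉ seen := by simpa [PySem.Set.contains] using hc
      rw [if_neg hc]
      have hadd : PySem.Set.add seen (pvTs d) = seen ++ [pvTs d] := by
        unfold PySem.Set.add
        rw [if_neg hc]
      rw [ih (acc ++ [d]) (PySem.Set.add seen (pvTs d))]
      simp only [pvFbk, if_neg hm, hadd]
      rw [pvFbk_congr zs (seen ++ [pvTs d]) (pvTs d :: seen) (by intro x hx; simp [or_comm])]
      simp

-- ===== VERDICT (by name: the statement is the Claim_ definition above) =====
theorem clean_and_merge_volume_data_spec : Claim_equal_clean_and_merge_volume_data := by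
  intro vd _
  unfold Spec_clean_and_merge_volume_data
  by_cases hvd : vd = []
  · subst hvd; rfl
  · simp only [clean_and_merge_volume_data, clean_and_merge_volume_data_alt, if_neg hvd]
    rw [pvFoldA vd (PySem.Dict.mk []) [""] (by intro t; simp [PySem.Dict.contains])]
    have hval : (PySem.Dict.mk ([] : List (String × List (String × String)))).values = [] := rfl
    rw [hval, List.nil_append]
    rw [pvFbk_filter vd [""] (by simp)]
    rw [pvSorted_fbk_comm]
    rw [pvFoldB (PySem.List.sorted (vd.filter (fun r => pvTs r ≠ "")) (fun x => pvTs x)) [] (PySem.Set.ofList [])]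
    rw [List.nil_append]
    have hof : (PySem.Set.ofList ([] : List String)) = ([] : List String) := rfl
    rw [hof]
    apply pvFbk_congr
    intro r hr
    have hrf : r ∈ vd.filter (fun r => pvTs r ≠ "") := (PySem.List.mem_sorted _ _ _ _).mp hr
    have hne : pvTs r ≠ "" := by simpa using (List.mem_filter.mp hrf).2
    simp [hne]
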